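-- pv_equiv track=rewrite | github.com/huangziwei/nk | src/nk/core.py | _looks_like_ascii_word
-- ===== SOURCE A (Python) =====
-- def _looks_like_ascii_word(text: str) -> bool:
--     stripped = text.strip()
--     if not stripped:
--         return False
--     has_alpha = False
--     for ch in stripped:
--         if ch.isalpha() and ch.isascii():
--             has_alpha = True
--         elif ch.isdigit() and ch.isascii():
--             continue
--         elif ch in {"-", "_", "'", "’", "・"}:
--             continue
--         else:
--             return False
--     return has_alpha
-- ===== SOURCE B (Python) =====
-- _ALLOWED = "ABCDEFGHIJKLMNOPQRSTUVWXYZabcdefghijklmnopqrstuvwxyz0123456789-_'\u2019\u30fb"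
-- _NON_LETTER = "0123456789-_'\u2019\u30fb"
--
--
-- def _looks_like_ascii_word(text: str) -> bool:
--     # Stripping away every allowed character must consume the whole string,
--     # and stripping away the allowed non-letters must leave something (a letter).
--     s = text.strip()
--     return bool(s) and not s.strip(_ALLOWED) and bool(s.strip(_NON_LETTER))
-- ===== Notes on version B (the rewrite author's own statement) =====
-- stated objective: alternative
-- what changed: Replaced A's explicit per-character loop with its has_alpha flag and early return by two str.strip(chars) calls against precomputed constant strings: stripping every allowed character must consume the whole string, and stripping the allowed non-letters must leave a letter behind.
import Mathlib
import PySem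

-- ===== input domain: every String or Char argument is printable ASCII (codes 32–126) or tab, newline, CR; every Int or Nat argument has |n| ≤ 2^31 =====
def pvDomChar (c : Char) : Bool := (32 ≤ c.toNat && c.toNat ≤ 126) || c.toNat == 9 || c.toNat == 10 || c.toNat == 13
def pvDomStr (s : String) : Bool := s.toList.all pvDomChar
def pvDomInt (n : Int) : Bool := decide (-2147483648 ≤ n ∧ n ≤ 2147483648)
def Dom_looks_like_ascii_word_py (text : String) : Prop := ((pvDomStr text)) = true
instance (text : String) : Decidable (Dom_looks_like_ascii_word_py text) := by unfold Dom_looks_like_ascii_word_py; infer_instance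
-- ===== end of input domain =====

-- B replaces A's per-character state machine (has_alpha flag, early return) with two
-- calls to str.strip(chars): stripping all allowed characters must consume the whole
-- string, and stripping the allowed non-letters must leave something; same cost, no
-- explicit character loop.

-- ===== PORT A =====
-- the for-loop of A: state = has_alpha, early `return False` = result false
def pyLoopA : List Char → Bool → Bool
  | [], hasAlpha => hasAlpha
  | c :: rest, hasAlpha =>
    if PySem.Chars.isalpha c && decide (c.toNat ≤ 127) then pyLoopA rest true
    else if PySem.Chars.isdigit c && decide (c.toNat ≤ 127) then pyLoopA rest hasAlpha
    else if c ∈ ['-', '_', '\'', '’', '・'] then pyLoopA rest hasAlpha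
    else false

def looks_like_ascii_word_py (text : String) : Bool :=
  let stripped := PySem.Str.strip text
  if stripped = "" then false
  else pyLoopA stripped.toList false

-- ===== PORT B =====
-- the module constants _ALLOWED and _NON_LETTER of Source B
def pvAllowed : String := "ABCDEFGHIJKLMNOPQRSTUVWXYZabcdefghijklmnopqrstuvwxyz0123456789-_'’・"
def pvNonLetter : String := "0123456789-_'’・"

-- bool(s) and not s.strip(_ALLOWED) and bool(s.strip(_NON_LETTER))
def looks_like_ascii_word_py_alt (text : String) : Bool :=
  let s := PySem.Str.strip text
  decide (s ≠ "") && decide (PySem.Str.stripChars s pvAllowed = "")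
    && decide (PySem.Str.stripChars s pvNonLetter ≠ "")

-- ===== PRECONDITION & SPEC =====
def Spec_looks_like_ascii_word_py (text : String) (out : Bool) : Prop := out = looks_like_ascii_word_py_alt text
instance (text : String) (out : Bool) : Decidable (Spec_looks_like_ascii_word_py text out) := by unfold Spec_looks_like_ascii_word_py; infer_instance

-- ===== CLAIM (what is proved, stated in full; the proofs are below) =====
def Claim_equal_looks_like_ascii_word_py : Prop := ∀ (text : String), Dom_looks_like_ascii_word_py text → Spec_looks_like_ascii_word_py text (looks_like_ascii_word_py text)

-- ===== LEMMAS AND PROOFS =====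

-- the character classes of A's branches, as range tests
def bAllowed (c : Char) : Bool :=
  (decide ('A' ≤ c) && decide (c ≤ 'Z')) || (decide ('a' ≤ c) && decide (c ≤ 'z')) ||
  (decide ('0' ≤ c) && decide (c ≤ '9')) || decide (c ∈ ['-', '_', '\'', '’', '・'])

def bLetter (c : Char) : Bool :=
  (decide ('A' ≤ c) && decide (c ≤ 'Z')) || (decide ('a' ≤ c) && decide (c ≤ 'z'))

theorem alphaA_eq_bLetter (c : Char) :
    (PySem.Chars.isalpha c && decide (c.toNat ≤ 127)) = bLetter c := by
  rw [bLetter, Bool.eq_iff_iff]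
  simp [PySem.Chars.isalpha, PySem.Chars.isupper, PySem.Chars.islower, Char.le_def,
    UInt32.le_iff_toNat_le]
  omega

theorem letter_allowed (c : Char) (h : bLetter c = true) : bAllowed c = true := by
  simp only [bLetter] at h
  simp only [bAllowed]
  rcases Bool.or_eq_true_iff.mp h with h' | h' <;> simp [h']

theorem digit_allowed (c : Char) (h : (PySem.Chars.isdigit c && decide (c.toNat ≤ 127)) = true) :
    bAllowed c = true := by
  simp only [PySem.Chars.isdigit, Bool.and_eq_true] at h
  simp [bAllowed, h.1.1, h.1.2]

theorem punct_allowed (c : Char) (h : c ∈ ['-', '_', '\'', '’', '・']) : bAllowed c = true := by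
  simp [bAllowed, h]

theorem none_allowed (c : Char) (h1 : bLetter c = false)
    (h2 : (PySem.Chars.isdigit c && decide (c.toNat ≤ 127)) = false)
    (h3 : c ∉ ['-', '_', '\'', '’', '・']) : bAllowed c = false := by
  simp only [bLetter, PySem.Chars.isdigit, Char.le_def, UInt32.le_iff_toNat_le] at h1 h2 ⊢
  simp only [bAllowed, Char.le_def, UInt32.le_iff_toNat_le]
  simp_all
  omega

-- A's loop computes: all characters allowed, and some character is a letter (or the flag was set)
theorem loopA_eq (cs : List Char) (ha : Bool) :
    pyLoopA cs ha = (cs.all bAllowed && (ha || cs.any bLetter)) := by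
  induction cs generalizing ha with
  | nil => simp [pyLoopA]
  | cons c rest ih =>
    rw [pyLoopA, alphaA_eq_bLetter]
    by_cases hl : bLetter c = true
    · simp [hl, ih, letter_allowed c hl]
    · have hl' : bLetter c = false := by simpa using hl
      by_cases hd : (PySem.Chars.isdigit c && decide (c.toNat ≤ 127)) = true
      · simp [hl', hd, ih, digit_allowed c hd]
      · have hd' : (PySem.Chars.isdigit c && decide (c.toNat ≤ 127)) = false := by simpa using hd
        by_cases hp : c ∈ ['-', '_', '\'', '’', '・']
        · simp [hl', hd', hp, ih, punct_allowed c hp]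
        · simp [hl', hd', hp, none_allowed c hl' hd' hp]

-- membership in Source B's constant strings, as the range tests above
theorem mem_allowed (c : Char) : pvAllowed.toList.contains c = bAllowed c := by
  rw [Bool.eq_iff_iff, List.contains_iff_mem,
    show pvAllowed.toList = ['A', 'B', 'C', 'D', 'E', 'F', 'G', 'H', 'I', 'J', 'K', 'L', 'M', 'N', 'O', 'P', 'Q', 'R', 'S', 'T', 'U', 'V', 'W', 'X', 'Y', 'Z', 'a', 'b', 'c', 'd', 'e', 'f', 'g', 'h', 'i', 'j', 'k', 'l', 'm', 'n', 'o', 'p', 'q', 'r', 's', 't', 'u', 'v', 'w', 'x', 'y', 'z', '0', '1', '2', '3', '4', '5', '6', '7', '8', '9', '-', '_', '\'', '’', '・'] from by decide]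
  simp only [bAllowed, Bool.or_eq_true, Bool.and_eq_true, decide_eq_true_eq,
    List.mem_cons, List.not_mem_nil, or_false, Char.le_def, Char.ext_iff, UInt32.le_iff_toNat_le,
    UInt32.ext_iff,
    show 'A'.val.toNat = 65 from rfl, show 'B'.val.toNat = 66 from rfl, show 'C'.val.toNat = 67 from rfl,
    show 'D'.val.toNat = 68 from rfl, show 'E'.val.toNat = 69 from rfl, show 'F'.val.toNat = 70 from rfl,
    show 'G'.val.toNat = 71 from rfl, show 'H'.val.toNat = 72 from rfl, show 'I'.val.toNat = 73 from rfl,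
    show 'J'.val.toNat = 74 from rfl, show 'K'.val.toNat = 75 from rfl, show 'L'.val.toNat = 76 from rfl,
    show 'M'.val.toNat = 77 from rfl, show 'N'.val.toNat = 78 from rfl, show 'O'.val.toNat = 79 from rfl,
    show 'P'.val.toNat = 80 from rfl, show 'Q'.val.toNat = 81 from rfl, show 'R'.val.toNat = 82 from rfl,
    show 'S'.val.toNat = 83 from rfl, show 'T'.val.toNat = 84 from rfl, show 'U'.val.toNat = 85 from rfl,
    show 'V'.val.toNat = 86 from rfl, show 'W'.val.toNat = 87 from rfl, show 'X'.val.toNat = 88 from rfl,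
    show 'Y'.val.toNat = 89 from rfl, show 'Z'.val.toNat = 90 from rfl,
    show 'a'.val.toNat = 97 from rfl, show 'b'.val.toNat = 98 from rfl, show 'c'.val.toNat = 99 from rfl,
    show 'd'.val.toNat = 100 from rfl, show 'e'.val.toNat = 101 from rfl, show 'f'.val.toNat = 102 from rfl,
    show 'g'.val.toNat = 103 from rfl, show 'h'.val.toNat = 104 from rfl, show 'i'.val.toNat = 105 from rfl,
    show 'j'.val.toNat = 106 from rfl, show 'k'.val.toNat = 107 from rfl, show 'l'.val.toNat = 108 from rfl,
    show 'm'.val.toNat = 109 from rfl, show 'n'.val.toNat = 110 from rfl, show 'o'.val.toNat = 111 from rfl,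
    show 'p'.val.toNat = 112 from rfl, show 'q'.val.toNat = 113 from rfl, show 'r'.val.toNat = 114 from rfl,
    show 's'.val.toNat = 115 from rfl, show 't'.val.toNat = 116 from rfl, show 'u'.val.toNat = 117 from rfl,
    show 'v'.val.toNat = 118 from rfl, show 'w'.val.toNat = 119 from rfl, show 'x'.val.toNat = 120 from rfl,
    show 'y'.val.toNat = 121 from rfl, show 'z'.val.toNat = 122 from rfl,
    show '0'.val.toNat = 48 from rfl, show '1'.val.toNat = 49 from rfl, show '2'.val.toNat = 50 from rfl,
    show '3'.val.toNat = 51 from rfl, show '4'.val.toNat = 52 from rfl, show '5'.val.toNat = 53 from rfl,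
    show '6'.val.toNat = 54 from rfl, show '7'.val.toNat = 55 from rfl, show '8'.val.toNat = 56 from rfl,
    show '9'.val.toNat = 57 from rfl, show '-'.val.toNat = 45 from rfl, show '_'.val.toNat = 95 from rfl,
    show '\''.val.toNat = 39 from rfl, show '’'.val.toNat = 8217 from rfl, show '・'.val.toNat = 12539 from rfl]
  omega

theorem mem_nonletter (c : Char) : pvNonLetter.toList.contains c = (bAllowed c && !bLetter c) := by
  rw [Bool.eq_iff_iff, List.contains_iff_mem,
    show pvNonLetter.toList = ['0', '1', '2', '3', '4', '5', '6', '7', '8', '9', '-', '_', '\'', '’', '・'] from by decide]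
  simp only [bAllowed, bLetter, Bool.and_eq_true, Bool.or_eq_true, Bool.not_eq_true',
    Bool.or_eq_false_iff, Bool.and_eq_false_iff, decide_eq_true_eq, decide_eq_false_iff_not,
    List.mem_cons, List.not_mem_nil, or_false, Char.le_def, Char.ext_iff, UInt32.le_iff_toNat_le,
    UInt32.ext_iff, not_le,
    show 'A'.val.toNat = 65 from rfl, show 'Z'.val.toNat = 90 from rfl,
    show 'a'.val.toNat = 97 from rfl, show 'z'.val.toNat = 122 from rfl,
    show '0'.val.toNat = 48 from rfl, show '1'.val.toNat = 49 from rfl, show '2'.val.toNat = 50 from rfl,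
    show '3'.val.toNat = 51 from rfl, show '4'.val.toNat = 52 from rfl, show '5'.val.toNat = 53 from rfl,
    show '6'.val.toNat = 54 from rfl, show '7'.val.toNat = 55 from rfl, show '8'.val.toNat = 56 from rfl,
    show '9'.val.toNat = 57 from rfl, show '-'.val.toNat = 45 from rfl, show '_'.val.toNat = 95 from rfl,
    show '\''.val.toNat = 39 from rfl, show '’'.val.toNat = 8217 from rfl, show '・'.val.toNat = 12539 from rfl]
  omega

theorem memP_allowed (c : Char) : c ∈ pvAllowed.toList ↔ bAllowed c = true := by
  rw [← List.contains_iff_mem, mem_allowed]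

theorem memP_nonletter (c : Char) : c ∈ pvNonLetter.toList ↔ (bAllowed c && !bLetter c) = true := by
  rw [← List.contains_iff_mem, mem_nonletter]

theorem dropWhile_forall {α : Type} (p : α → Bool) (l : List α) :
    (∀ x ∈ l.dropWhile p, p x = true) ↔ ∀ x ∈ l, p x = true := by
  induction l with
  | nil => simp
  | cons a l ih =>
    by_cases ha : p a = true
    · simp only [List.dropWhile_cons, if_pos ha, ih, List.mem_cons, forall_eq_or_imp]
      exact ⟨fun h => ⟨ha, h⟩, fun h => h.2⟩
    · simp only [List.dropWhile_cons, if_neg ha]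

-- s.strip(chars) is empty iff every character of s is in chars
theorem stripChars_eq_nil (l chars : List Char) :
    (PySem.Chars.stripChars l chars = []) ↔ ∀ c ∈ l, chars.contains c = true := by
  unfold PySem.Chars.stripChars
  rw [List.reverse_eq_nil_iff, List.dropWhile_eq_nil_iff]
  simp only [List.mem_reverse]
  exact dropWhile_forall _ l

theorem looks_like_ascii_word_py_spec' (text : String) :
    looks_like_ascii_word_py text = looks_like_ascii_word_py_alt text := by
  unfold looks_like_ascii_word_py looks_like_ascii_word_py_alt
  by_cases hs : PySem.Str.strip text = ""
  · simp [hs]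
  · have hA : PySem.Str.stripChars (PySem.Str.strip text) pvAllowed = "" ↔
        ∀ c ∈ (PySem.Str.strip text).toList, bAllowed c = true := by
      rw [← String.toList_inj, show ("" : String).toList = [] from rfl,
        PySem.Str.toList_stripChars, stripChars_eq_nil]
      simp [memP_allowed]
    have hN : PySem.Str.stripChars (PySem.Str.strip text) pvNonLetter = "" ↔
        ∀ c ∈ (PySem.Str.strip text).toList, (bAllowed c && !bLetter c) = true := by
      rw [← String.toList_inj, show ("" : String).toList = [] from rfl,
        PySem.Str.toList_stripChars, stripChars_eq_nil]
      simp [memP_nonletter]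
    have h1 : decide (PySem.Str.strip text ≠ "") = true := by simp [hs]
    rw [if_neg hs, loopA_eq]
    show _ = (decide (PySem.Str.strip text ≠ "") && decide (PySem.Str.stripChars (PySem.Str.strip text) pvAllowed = "")
      && decide (PySem.Str.stripChars (PySem.Str.strip text) pvNonLetter ≠ ""))
    rw [h1, Bool.true_and, Bool.false_or, Bool.eq_iff_iff]
    simp only [Bool.and_eq_true, List.all_eq_true, List.any_eq_true, decide_eq_true_eq,
      Bool.not_eq_true', ne_eq, hA, hN]
    constructor
    · rintro ⟨hall, c, hc, hl⟩
      refine ⟨hall, fun h => ?_⟩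
      have h2 := h c hc
      rw [h2.2] at hl
      exact Bool.false_ne_true hl
    · rintro ⟨hall, hne⟩
      refine ⟨hall, ?_⟩
      by_contra hno
      push Not at hno
      apply hne
      intro c hc
      refine ⟨hall c hc, ?_⟩
      simpa using hno c hc

-- ===== VERDICT (by name: the statement is the Claim_ definition above) =====
theorem looks_like_ascii_word_py_spec : Claim_equal_looks_like_ascii_word_py := by
  intro text _
  unfold Spec_looks_like_ascii_word_py
  exact looks_like_ascii_word_py_spec' text
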